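-- pv_equiv track=rewrite | github.com/singhvi28/templates | template_math.py | _get_derangements
-- ===== SOURCE A (Python) =====
-- MOD = 10**9 + 7
--
-- def _get_derangements(n):
--     """Return derangements upto n."""
--     if n == 0: return 1
--     if n == 1: return 0
--     dp = [0] * (n + 1)
--     dp[0] = 1
--     dp[1] = 0
--     for i in range(2, n + 1): dp[i] = ((i - 1) * (dp[i - 1] + dp[i - 2])) % MOD
--     return dp
-- ===== SOURCE B (Python) =====
-- MOD = 10**9 + 7
--
-- def _get_derangements(n):
--     """Return derangements upto n."""
--     if n == 0: return 1
--     if n == 1: return 0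
--     dp = [1, 0]
--     prev = 0
--     for i in range(2, n + 1):
--         prev = (i * prev + (1 if i % 2 == 0 else -1)) % MOD
--         dp.append(prev)
--     return dp
-- ===== Notes on version B (the rewrite author's own statement) =====
-- stated objective: alternative
-- what changed: Replaces the two-term recurrence d(i)=(i-1)*(d(i-1)+d(i-2)) over an indexed preallocated array with the one-term alternating-sign recurrence d(i)=(i*d(i-1)+(-1)^i) mod p carried in a single running variable, appending forward to the result list.
-- outside the precondition, e.g. on _get_derangements(0): A returns 1, B returns 1; on _get_derangements(1): A returns 0, B returns 0
import Mathlib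
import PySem

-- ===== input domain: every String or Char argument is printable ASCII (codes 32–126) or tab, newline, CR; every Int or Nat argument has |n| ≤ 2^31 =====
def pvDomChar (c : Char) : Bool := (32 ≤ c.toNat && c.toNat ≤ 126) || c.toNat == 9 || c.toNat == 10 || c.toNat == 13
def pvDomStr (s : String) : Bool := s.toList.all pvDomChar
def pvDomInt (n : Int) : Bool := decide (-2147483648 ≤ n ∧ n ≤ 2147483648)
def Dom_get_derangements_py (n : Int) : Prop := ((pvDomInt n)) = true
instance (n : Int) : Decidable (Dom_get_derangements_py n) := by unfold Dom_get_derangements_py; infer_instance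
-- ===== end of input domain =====

-- B replaces A's two-term derangement recurrence over an indexed preallocated array by the
-- one-term alternating-sign recurrence d(i) = (i*d(i-1) + (-1)^i) mod p carried in a single
-- running variable, appending forward (alternative decomposition, same O(n) cost).

-- ===== PORT A =====
-- Python A: dp = [0]*(n+1); dp[0]=1; dp[1]=0; for i in range(2, n+1): dp[i] = ((i-1)*(dp[i-1]+dp[i-2])) % MOD
-- (the n==0 / n==1 early returns produce a bare int in Python, outside Pre_; ported as one-element lists)
def get_derangements_py (n : Int) : List Int :=
  if n = 0 then [1]
  else if n = 1 then [0]
  else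
    let dp := PySem.List.pyRepeat [(0 : Int)] (n + 1)
    let dp := PySem.List.pySetD dp 0 1
    let dp := PySem.List.pySetD dp 1 0
    (PySem.List.pyRange 2 (n + 1) 1).foldl
      (fun dp i =>
        PySem.List.pySetD dp i
          (PySem.Int.mod ((i - 1) * (PySem.List.pyGetD dp (i - 1) 0 + PySem.List.pyGetD dp (i - 2) 0)) 1000000007))
      dp

-- ===== PORT B =====
-- Python B: dp=[1,0]; prev=0; for i in range(2,n+1): prev=(i*prev+(1 if i%2==0 else -1))%MOD; dp.append(prev)
def get_derangements_py_alt (n : Int) : List Int :=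
  if n = 0 then [1]
  else if n = 1 then [0]
  else
    ((PySem.List.pyRange 2 (n + 1) 1).foldl
      (fun (st : List Int × Int) i =>
        let prev := PySem.Int.mod (i * st.2 + (if PySem.Int.mod i 2 = 0 then 1 else -1)) 1000000007
        (st.1 ++ [prev], prev))
      ([1, 0], 0)).1

-- ===== PRECONDITION & SPEC =====
-- Pre_ excludes n < 2: for n in {0,1} A returns a bare int (1 resp. 0), not a value of the declared
-- list return type (B does the same there), and for n < 0 A raises IndexError.
def Pre_get_derangements_py (n : Int) : Prop := 2 ≤ n
instance (n : Int) : Decidable (Pre_get_derangements_py n) := by unfold Pre_get_derangements_py; infer_instance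
def pvWitness_get_derangements_py : Int := 5

def Spec_get_derangements_py (n : Int) (out : List Int) : Prop := out = get_derangements_py_alt n
instance (n : Int) (out : List Int) : Decidable (Spec_get_derangements_py n out) := by unfold Spec_get_derangements_py; infer_instance

-- ===== CLAIM (what is proved, stated in full; the proofs are below) =====
def Claim_equal_get_derangements_py : Prop := ∀ (n : Int), Dom_get_derangements_py n → Pre_get_derangements_py n → Spec_get_derangements_py n (get_derangements_py n)

-- ===== LEMMAS AND PROOFS =====

def pvD : Nat → Int
  | 0 => 1
  | 1 => 0
  | (k + 2) => PySem.Int.mod (((k : Int) + 1) * (pvD (k + 1) + pvD k)) 1000000007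

lemma pvD_succ (k : Nat) : pvD (k+2) = PySem.Int.mod (((k : Int) + 1) * (pvD (k + 1) + pvD k)) 1000000007 := rfl

lemma pvD_alt (k : Nat) :
    pvD (k + 2) =
      PySem.Int.mod (((k : Int) + 2) * pvD (k + 1) +
        (if PySem.Int.mod ((k : Int) + 2) 2 = 0 then 1 else -1)) 1000000007 := by
  induction k with
  | zero => decide
  | succ k ih =>
    have hM : (0:Int) < 1000000007 := by norm_num
    have h2 : (0:Int) < 2 := by norm_num
    simp only [PySem.Int.mod_eq_emod_of_pos hM, PySem.Int.mod_eq_emod_of_pos h2] at *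
    set d1 := pvD (k + 1) with hd1
    set s : Int := (if ((k:Int) + 2) % 2 = 0 then 1 else -1) with hs
    set X : Int := ((k:Int) + 2) * d1 + s with hX
    have e1 : pvD (k + 1 + 2) = (((k:Int) + 2) * (pvD (k + 2) + d1)) % 1000000007 := by
      rw [pvD_succ, PySem.Int.mod_eq_emod_of_pos hM]
      congr 2
    have hsflip : (if ((k:Int) + 1 + 2) % 2 = 0 then (1:Int) else -1) = -s := by
      rw [hs]; split_ifs with h1 h2 <;> omega
    rw [e1, ih]
    push_cast
    rw [hsflip]
    rw [Int.emod_eq_emod_iff_emod_sub_eq_zero]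
    have key : ((k:Int) + 2) * (X % 1000000007 + d1) - ((↑k + 1 + 2) * (X % 1000000007) + -s)
        = 1000000007 * (X / 1000000007) := by
      have h := Int.mul_ediv_add_emod X 1000000007
      rw [hX] at h ⊢
      linarith [h]
    rw [key]
    exact Int.mul_emod_right _ _

lemma pvB_inv (m : Nat) (h1 : 1 ≤ m) :
    (PySem.List.pyRange 2 ((m : Int) + 1) 1).foldl
      (fun (st : List Int × Int) i =>
        let prev := PySem.Int.mod (i * st.2 + (if PySem.Int.mod i 2 = 0 then 1 else -1)) 1000000007
        (st.1 ++ [prev], prev))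
      ([1, 0], 0)
    = ((List.range (m + 1)).map pvD, pvD m) := by
  induction m with
  | zero => omega
  | succ m ih =>
    rcases Nat.eq_or_lt_of_le h1 with h | h
    · have : m = 0 := by omega
      subst this
      decide
    · have hm : 1 ≤ m := by omega
      have hr : PySem.List.pyRange 2 ((m:Int) + 1 + 1) 1
          = PySem.List.pyRange 2 ((m:Int) + 1) 1 ++ [(m:Int) + 1] :=
        PySem.List.pyRange_one_succ_right (by exact_mod_cast Nat.succ_le_of_lt h)
      push_cast
      rw [hr, List.foldl_append, ih hm]
      have hstep : pvD (m + 1) = PySem.Int.mod (((m:Int) + 1) * pvD m +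
          (if PySem.Int.mod ((m:Int) + 1) 2 = 0 then 1 else -1)) 1000000007 := by
        obtain ⟨j, rfl⟩ : ∃ j, m = j + 1 := ⟨m - 1, by omega⟩
        have := pvD_alt j
        push_cast at this ⊢
        convert this using 4
      dsimp only [List.foldl]
      rw [List.range_succ, List.map_append, ← hstep]
      simp [List.range_succ]

lemma pvA_inv (N m : Nat) (h1 : 1 ≤ m) (h2 : m ≤ N) :
    (PySem.List.pyRange 2 ((m : Int) + 1) 1).foldl
      (fun dp i =>
        PySem.List.pySetD dp i
          (PySem.Int.mod ((i - 1) * (PySem.List.pyGetD dp (i - 1) 0 + PySem.List.pyGetD dp (i - 2) 0)) 1000000007))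
      ((1 : Int) :: 0 :: List.replicate (N - 1) 0)
    = (List.range (m + 1)).map pvD ++ List.replicate (N - m) 0 := by
  induction m with
  | zero => omega
  | succ m ih =>
    rcases Nat.eq_or_lt_of_le h1 with h | h
    · have : m = 0 := by omega
      subst this
      rw [PySem.List.pyRange_one_eq_nil (by norm_num)]
      simp [List.range_succ]
      exact ⟨rfl, rfl⟩
    · have hm : 1 ≤ m := by omega
      have hmN : m ≤ N := by omega
      have hr : PySem.List.pyRange 2 ((m:Int) + 1 + 1) 1
          = PySem.List.pyRange 2 ((m:Int) + 1) 1 ++ [(m:Int) + 1] :=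
        PySem.List.pyRange_one_succ_right (by exact_mod_cast Nat.succ_le_of_lt h)
      push_cast
      rw [hr, List.foldl_append, ih hm hmN]
      dsimp only [List.foldl]
      set L : List Int := (List.range (m + 1)).map pvD ++ List.replicate (N - m) 0 with hL
      have hlen : ((List.range (m + 1)).map pvD).length = m + 1 := by simp
      have hg1 : PySem.List.pyGetD L ((m:Int) + 1 - 1) 0 = pvD m := by
        have : ((m:Int) + 1 - 1) = ((m : Nat) : Int) := by ring
        rw [this, PySem.List.pyGetD_natCast, hL, List.getD_append _ _ _ _ (by simp)]
        simp [List.getD]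
      have hg2 : PySem.List.pyGetD L ((m:Int) + 1 - 2) 0 = pvD (m - 1) := by
        have : ((m:Int) + 1 - 2) = (((m - 1 : Nat)) : Int) := by push_cast [hm]; ring
        rw [this, PySem.List.pyGetD_natCast, hL, List.getD_append _ _ _ _ (by simp)]
        simp [List.getD]
      have hv : PySem.Int.mod (((m:Int) + 1 - 1) * (pvD m + pvD (m - 1))) 1000000007 = pvD (m + 1) := by
        obtain ⟨j, rfl⟩ : ∃ j, m = j + 1 := ⟨m - 1, by omega⟩
        show PySem.Int.mod ((((j:Nat):Int) + 1 + 1 - 1) * _) _ = pvD (j + 2)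
        rw [pvD_succ]
        have e : ((j:Int) + 1 + 1 - 1) = ((j:Int) + 1) := by ring
        rw [e]; simp
      have hset : PySem.List.pySetD L ((m:Int) + 1) (pvD (m + 1))
          = (List.range (m + 1 + 1)).map pvD ++ List.replicate (N - (m + 1)) 0 := by
        have : ((m:Int) + 1) = (((m + 1 : Nat)) : Int) := by push_cast; ring
        rw [this, PySem.List.pySetD_natCast, hL]
        rw [List.set_append_right _ _ (by simp [hlen])]
        simp only [hlen, Nat.sub_self]
        rw [show N - m = (N - m - 1) + 1 from by omega, List.replicate_succ, List.set_cons_zero]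
        have e2 : N - m - 1 = N - (m + 1) := by omega
        rw [e2]
        simp [List.range_succ]
      rw [hg1, hg2, hv, hset]

lemma pv_main (n : Int) (hn : 2 ≤ n) : get_derangements_py n = get_derangements_py_alt n := by
  obtain ⟨N, rfl⟩ : ∃ N : Nat, n = (N : Int) := ⟨n.toNat, by omega⟩
  have hN : 2 ≤ N := by exact_mod_cast hn
  unfold get_derangements_py get_derangements_py_alt
  rw [if_neg (by omega), if_neg (by omega), if_neg (by omega), if_neg (by omega)]
  have h0 : PySem.List.pyRepeat [(0 : Int)] ((N:Int) + 1) = List.replicate (N + 1) 0 := by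
    rw [PySem.List.pyRepeat_singleton, show ((N:Int)+1).toNat = N + 1 from by omega]
  have h1 : List.replicate (N + 1) (0:Int) = 0 :: 0 :: List.replicate (N - 1) 0 := by
    rw [show N + 1 = (N - 1) + 1 + 1 from by omega]
    simp [List.replicate_succ]
  have hinit : PySem.List.pySetD (PySem.List.pySetD (0 :: 0 :: List.replicate (N - 1) (0:Int)) 0 1) 1 0
      = (1 : Int) :: 0 :: List.replicate (N - 1) 0 := by
    simp [pysem]
  simp only [h0, h1, hinit]
  have hA := pvA_inv N N (by omega) (le_refl N)
  have hB := pvB_inv N (by omega)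
  rw [hA, hB]
  simp


-- ===== VERDICT (by name: the statement is the Claim_ definition above) =====
theorem get_derangements_py_spec : Claim_equal_get_derangements_py := by
  intro n _ hpre
  exact pv_main n hpre
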